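-- pv_equiv track=rewrite | github.com/EpikGaming/GraduationDesign | 程序/FindPath.py | FindFaultDisplay
-- ===== SOURCE A (Python) =====
-- def FindFaultDisplay(DataDependence):
--     faultsource = {}
--     for key,value in DataDependence.items():
--         if isinstance(value,dict) == True:
--             for sure in value.values():
--                 if 'output' in sure:
--                     for source in value:
--                         faultsource[key] = source
--     txt = "模型中存在的故障变量为："
--     for value in faultsource.values():
--         txt += str(value) + "、"
--     txt = txt[:-1]
--     return txt
-- ===== SOURCE B (Python) =====
-- HEADER = "模型中存在的故障变量为："
-- SEP = "、"
--
--
-- def FindFaultDisplay(DataDependence):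
--     chunks = []
--     for value in DataDependence.values():
--         last, hit = None, False
--         for inner_key, inner_value in value.items():
--             last = inner_key
--             if 'output' in inner_value:
--                 hit = True
--         if hit:
--             chunks.append(last + SEP)
--     return (HEADER + "".join(chunks))[:-1]
-- ===== Notes on version B (the rewrite author's own statement) =====
-- stated objective: alternative
-- what changed: Drops A's faultsource dict, its redundant nested loop that re-inserts every inner key per matching inner dict, and the second pass over the dict's values; B scans each inner dict once with two accumulators (last key, hit flag), collects one 'name、' chunk per faulty key in a list, and joins the chunks before stripping the final separator.
import Mathlib
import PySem

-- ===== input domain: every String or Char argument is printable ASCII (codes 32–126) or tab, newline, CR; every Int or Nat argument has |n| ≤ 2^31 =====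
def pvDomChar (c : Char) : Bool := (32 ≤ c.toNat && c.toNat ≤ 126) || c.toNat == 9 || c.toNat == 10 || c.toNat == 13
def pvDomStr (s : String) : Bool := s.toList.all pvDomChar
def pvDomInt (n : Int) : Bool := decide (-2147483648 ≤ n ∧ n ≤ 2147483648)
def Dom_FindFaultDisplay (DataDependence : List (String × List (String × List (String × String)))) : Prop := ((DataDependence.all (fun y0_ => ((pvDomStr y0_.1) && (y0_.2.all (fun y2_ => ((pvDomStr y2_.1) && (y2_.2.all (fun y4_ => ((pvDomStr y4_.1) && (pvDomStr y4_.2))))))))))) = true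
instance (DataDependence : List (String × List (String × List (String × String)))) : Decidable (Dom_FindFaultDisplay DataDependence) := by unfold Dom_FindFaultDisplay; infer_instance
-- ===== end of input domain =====

-- B drops A's faultsource dict, its redundant nested re-assignment loop and the second output pass,
-- collecting one "name、" chunk per faulty key in a single pass (one scan per inner dict) and joining them; objective: alternative.


-- ===== PORT A =====
-- dicts arrive as association lists; PySem.Dict.ofList gives Python-dict semantics (dedup, last value wins).
-- isinstance(value, dict) is always True on the typed domain, so that branch is kept unconditionally.
def FindFaultDisplay (DataDependence : List (String × List (String × List (String × String)))) : String :=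
  let d := PySem.Dict.ofList DataDependence
  let faultsource : PySem.Dict String String :=
    d.items.foldl (fun fs kv =>
      let vd := PySem.Dict.ofList kv.2
      vd.values.foldl (fun fs sure =>
        if (PySem.Dict.ofList sure).contains "output" then
          vd.keys.foldl (fun fs source => fs.insert kv.1 source) fs
        else fs) fs) PySem.Dict.empty
  let txt : List Char := "模型中存在的故障变量为：".toList
  let txt := faultsource.values.foldl (fun t v => t ++ v.toList ++ ['、']) txt
  String.ofList (PySem.List.slice txt none (some (-1)))

-- ===== PORT B =====
-- chunks: one "<last inner key>、" entry per faulty key, collected in a list and joined at the end.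
-- 'last + SEP' only runs with hit = True, so the inner dict is nonempty there; Option.getD "" is the safe read.
def FindFaultDisplay_alt (DataDependence : List (String × List (String × List (String × String)))) : String :=
  let chunks : List (List Char) :=
    (PySem.Dict.ofList DataDependence).values.foldl (fun chunks value =>
      let vd := PySem.Dict.ofList value
      let p := vd.items.foldl
        (fun (p : Option String × Bool) iv =>
          (some iv.1, if (PySem.Dict.ofList iv.2).contains "output" then true else p.2))
        (none, false)
      if p.2 then chunks ++ [(p.1.getD "").toList ++ "、".toList] else chunks) []
  let s : List Char := "模型中存在的故障变量为：".toList ++ PySem.Chars.join [] chunks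
  String.ofList (PySem.List.slice s none (some (-1)))

-- ===== PRECONDITION & SPEC =====
def Spec_FindFaultDisplay (DataDependence : List (String × List (String × List (String × String)))) (out : String) : Prop := out = FindFaultDisplay_alt DataDependence
instance (DataDependence : List (String × List (String × List (String × String)))) (out : String) : Decidable (Spec_FindFaultDisplay DataDependence out) := by unfold Spec_FindFaultDisplay; infer_instance

-- ===== CLAIM (what is proved, stated in full; the proofs are below) =====
def Claim_equal_FindFaultDisplay : Prop := ∀ (DataDependence : List (String × List (String × List (String × String)))), Dom_FindFaultDisplay DataDependence → Spec_FindFaultDisplay DataDependence (FindFaultDisplay DataDependence)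

-- ===== LEMMAS AND PROOFS =====

-- overwriting insert of the same key twice collapses to the last insert
theorem ins_ins {κ ν : Type} [BEq κ] [LawfulBEq κ] (d : PySem.Dict κ ν) (k : κ) (a b : ν) :
    (d.insert k a).insert k b = d.insert k b := by
  apply PySem.Dict.ext
  by_cases h : d.contains k = true
  · rw [PySem.Dict.items_insert_of_contains _ _ (PySem.Dict.contains_insert_self d k a),
        PySem.Dict.items_insert_of_contains _ _ h,
        PySem.Dict.items_insert_of_contains _ _ h, List.map_map]
    apply List.map_congr_left
    intro p _
    by_cases hp : p.1 == k <;> simp [hp]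
  · have h' : d.contains k = false := by simpa using h
    have hne : ∀ p ∈ d.items, ((p.1 : κ) == k) = false := by
      intro p hp
      by_contra hc
      have hpk : p.1 = k := eq_of_beq (a := p.1) (b := k) (by simpa using hc)
      apply h
      rw [PySem.Dict.contains_iff_mem_keys]
      have : p.1 ∈ d.items.map Prod.fst := List.mem_map_of_mem hp
      simpa [PySem.Dict.keys, hpk] using this
    rw [PySem.Dict.items_insert_of_contains _ _ (PySem.Dict.contains_insert_self d k a),
        PySem.Dict.items_insert_of_not_contains _ _ h',
        PySem.Dict.items_insert_of_not_contains _ _ h', List.map_append]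
    congr 1
    · calc (d.items.map fun p => if (p.1 == k) = true then (k, b) else p)
          = d.items.map id := List.map_congr_left (fun p hp => by simp [hne p hp])
        _ = d.items := List.map_id _
    · simp

-- A's innermost 'for source in value' loop nets out to a single insert of the last key
theorem foldl_insert_const {κ ν : Type} [BEq κ] [LawfulBEq κ] (k : κ) :
    ∀ (keys : List ν) (hk : keys ≠ []) (fs : PySem.Dict κ ν),
    keys.foldl (fun fs s => fs.insert k s) fs = fs.insert k (keys.getLast hk)
  | [x], _, fs => by simp [List.foldl]
  | x :: y :: t, _, fs => by
      rw [List.foldl_cons, foldl_insert_const k (y :: t) (by simp) (fs.insert k x),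
          ins_ins]
      congr 1

-- a guarded fold of an idempotent action is 'if any then once'
theorem foldl_if_idem {α β : Type} (c : α → Bool) (F : β → β) (hF : ∀ x, F (F x) = F x) :
    ∀ (l : List α) (fs : β),
    l.foldl (fun fs s => if c s then F fs else fs) fs = if l.any c then F fs else fs
  | [], fs => by simp
  | x :: t, fs => by
      rw [List.foldl_cons, foldl_if_idem c F hF t]
      by_cases hx : c x <;> by_cases ht : t.any c <;> simp [hx, ht, hF]

theorem foldl_if_all_false {α β : Type} (c : α → Bool) (F : β → α → β) :
    ∀ (l : List α) (fs : β), l.any c = false →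
    l.foldl (fun fs s => if c s then F fs s else fs) fs = fs
  | [], fs, _ => rfl
  | x :: t, fs, h => by
      have hx : c x = false := by simp at h; exact h.1
      have ht : t.any c = false := by simp at h; simpa using h.2
      rw [List.foldl_cons, if_neg (by simp [hx])]
      exact foldl_if_all_false c F t fs ht

-- the per-key condition ('output' is a key of some inner dict) and result (last key), shared by both proofs
def pvC (value : List (String × List (String × String))) : Bool :=
  (PySem.Dict.ofList value).values.any (fun sure => (PySem.Dict.ofList sure).contains "output")

def pvL (value : List (String × List (String × String))) : String :=
  PySem.List.pyGetD (PySem.Dict.ofList value).keys (-1) ""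

-- A's two inner loops for one outer item reduce to 'if pvC then insert the last key'
theorem inner_step (k : String) (value : List (String × List (String × String)))
    (fs : PySem.Dict String String) :
    (PySem.Dict.ofList value).values.foldl (fun fs sure =>
        if (PySem.Dict.ofList sure).contains "output" then
          (PySem.Dict.ofList value).keys.foldl (fun fs source => fs.insert k source) fs
        else fs) fs
      = if pvC value then fs.insert k (pvL value) else fs := by
  by_cases h : (PySem.Dict.ofList value).values.any (fun sure => (PySem.Dict.ofList sure).contains "output")
  · have hv : (PySem.Dict.ofList value).values ≠ [] := by
      rcases List.any_eq_true.mp h with ⟨x, hx, -⟩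
      exact List.ne_nil_of_mem hx
    have hk : (PySem.Dict.ofList value).keys ≠ [] := by
      intro e
      apply hv
      have hlen := congrArg List.length e
      simp [PySem.Dict.keys] at hlen
      simp [PySem.Dict.values, hlen]
    have hfun : (fun (fs : PySem.Dict String String) (sure : List (String × String)) =>
        if (PySem.Dict.ofList sure).contains "output" then
          (PySem.Dict.ofList value).keys.foldl (fun fs source => fs.insert k source) fs
        else fs)
        = (fun fs sure => if (PySem.Dict.ofList sure).contains "output" then fs.insert k (pvL value) else fs) := by
      funext fs sure
      rw [foldl_insert_const k _ hk, pvL, PySem.List.pyGetD_neg_one _ _ hk]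
    rw [hfun, foldl_if_idem _ _ (fun x => ins_ins x k (pvL value) (pvL value)), pvC, if_pos h]
  · rw [pvC, if_neg (by simpa using h)]
    exact foldl_if_all_false _ (fun fs _ => _) _ fs (by simpa using h)

-- A's outer loop over distinct, fresh keys builds exactly the filtered item list
theorem outer_fold {κ ν μ : Type} [BEq κ] [LawfulBEq κ] (C : ν → Bool) (L : ν → μ) :
    ∀ (items : List (κ × ν)) (fs : PySem.Dict κ μ),
    (items.map Prod.fst).Nodup → (∀ kv ∈ items, fs.contains kv.1 = false) →
    (items.foldl (fun fs kv => if C kv.2 then fs.insert kv.1 (L kv.2) else fs) fs).items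
      = fs.items ++ (items.filter (fun kv => C kv.2)).map (fun kv => (kv.1, L kv.2))
  | [], fs, _, _ => by simp
  | kv :: t, fs, hnd, hfr => by
      rw [List.map_cons, List.nodup_cons] at hnd
      obtain ⟨hk1, hnd'⟩ := hnd
      rw [List.foldl_cons]
      by_cases hC : C kv.2
      · rw [if_pos hC]
        have hfr' : ∀ p ∈ t, (fs.insert kv.1 (L kv.2)).contains p.1 = false := by
          intro p hp
          rw [PySem.Dict.contains_insert]
          have h1 : (p.1 == kv.1) = false := by
            refine beq_false_of_ne ?_
            intro e
            exact hk1 (e ▸ List.mem_map_of_mem hp)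
          rw [h1, hfr p (.tail _ hp)]
          rfl
        rw [outer_fold C L t (fs.insert kv.1 (L kv.2)) hnd' hfr',
            PySem.Dict.items_insert_of_not_contains _ _ (hfr kv (.head _))]
        simp [hC]
      · rw [if_neg hC, outer_fold C L t fs hnd' (fun p hp => hfr p (.tail _ hp))]
        simp [hC]

-- A's append loop flattens: acc ++ one '<name>、' chunk per element
theorem foldl_append_chunks (c : Char) :
    ∀ (parts : List String) (acc : List Char),
    parts.foldl (fun t v => t ++ v.toList ++ [c]) acc
      = acc ++ parts.flatMap (fun v => v.toList ++ [c])
  | [], acc => by simp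
  | p :: t, acc => by
      rw [List.foldl_cons, foldl_append_chunks c t (acc ++ p.toList ++ [c])]
      simp

-- B's inner pair fold: first = last key so far, second = whether any inner dict has key 'output'
theorem pair_fold (l : List (String × List (String × String))) :
    ∀ (a : Option String) (b : Bool),
    l.foldl (fun (p : Option String × Bool) iv =>
        (some iv.1, if (PySem.Dict.ofList iv.2).contains "output" then true else p.2)) (a, b)
      = (l.foldl (fun _ iv => some iv.1) a,
         b || l.any (fun iv => (PySem.Dict.ofList iv.2).contains "output")) := by
  induction l with
  | nil => intro a b; simp
  | cons x t ih =>
      intro a b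
      rw [List.foldl_cons, ih]
      by_cases hx : (PySem.Dict.ofList x.2).contains "output" <;>
        simp [hx, List.foldl_cons]

theorem last_fold :
    ∀ (l : List (String × List (String × String))) (a : Option String),
    l.foldl (fun _ iv => some iv.1) a = (l.getLast?).elim a (fun iv => some iv.1)
  | [], a => rfl
  | x :: t, a => by
      cases t with
      | nil => rfl
      | cons y t' =>
          rw [List.foldl_cons, last_fold (y :: t') (some x.1), List.getLast?_cons_cons]
          rcases (y :: t').getLast?.eq_none_or_eq_some with h | ⟨w, h⟩
          · exact absurd (List.getLast?_eq_none_iff.mp h) (by simp)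
          · simp [h]

-- joining with the empty separator is flattening
theorem join_nil_flatten : ∀ parts : List (List Char),
    PySem.Chars.join [] parts = parts.flatten
  | [] => by simp [PySem.Chars.join_nil]
  | [p] => by simp [PySem.Chars.join_singleton]
  | p :: q :: t => by
      rw [PySem.Chars.join_cons_cons, join_nil_flatten (q :: t)]
      simp

-- B's loop body nets out to 'if pvC then append the <last key>、 chunk'
theorem b_step :
    (fun (chunks : List (List Char)) (value : List (String × List (String × String))) =>
      let vd := PySem.Dict.ofList value
      let p := vd.items.foldl
        (fun (p : Option String × Bool) iv =>
          (some iv.1, if (PySem.Dict.ofList iv.2).contains "output" then true else p.2))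
        (none, false)
      if p.2 then chunks ++ [(p.1.getD "").toList ++ "、".toList] else chunks)
    = (fun chunks value => if pvC value then chunks ++ [(pvL value).toList ++ ['、']] else chunks) := by
  funext chunks value
  have hany : (PySem.Dict.ofList value).items.any
        (fun iv => (PySem.Dict.ofList iv.2).contains "output") = pvC value := by
    simp [pvC, PySem.Dict.values, List.any_map, Function.comp_def]
  simp only [pair_fold]
  have hsep : "、".toList = ['、'] := rfl
  by_cases hC : pvC value
  · have hne : (PySem.Dict.ofList value).items ≠ [] := by
      rcases List.any_eq_true.mp (hany ▸ hC) with ⟨x, hx, -⟩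
      exact List.ne_nil_of_mem hx
    have hkeys : (PySem.Dict.ofList value).keys ≠ [] := by
      simp [PySem.Dict.keys, hne]
    have hlast : (PySem.Dict.ofList value).items.foldl (fun _ iv => some iv.1) none
        = some (pvL value) := by
      rw [last_fold _ none, List.getLast?_eq_some_getLast hne]
      have hk : pvL value = ((PySem.Dict.ofList value).items.getLast hne).1 := by
        rw [pvL, PySem.List.pyGetD_neg_one _ _ hkeys]
        simp only [PySem.Dict.keys]
        rw [List.getLast_map]
      simp [hk]
    simp [hany, hC, hlast, hsep]
  · simp [hany, hC]

-- ===== VERDICT (by name: the statement is the Claim_ definition above) =====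
theorem FindFaultDisplay_spec : Claim_equal_FindFaultDisplay := by
  intro dd _
  show FindFaultDisplay dd = FindFaultDisplay_alt dd
  simp only [FindFaultDisplay, FindFaultDisplay_alt]
  have hstep : (fun (fs : PySem.Dict String String) (kv : String × List (String × List (String × String))) =>
      (PySem.Dict.ofList kv.2).values.foldl (fun fs sure =>
        if (PySem.Dict.ofList sure).contains "output" then
          (PySem.Dict.ofList kv.2).keys.foldl (fun fs source => fs.insert kv.1 source) fs
        else fs) fs)
      = (fun fs kv => if pvC kv.2 then fs.insert kv.1 (pvL kv.2) else fs) :=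
    funext fun fs => funext fun kv => inner_step kv.1 kv.2 fs
  rw [hstep]
  have hnd : ((PySem.Dict.ofList dd).items.map Prod.fst).Nodup := by
    have := PySem.Dict.nodup_keys_ofList dd
    simpa [PySem.Dict.keys] using this
  have hfold := outer_fold pvC pvL (PySem.Dict.ofList dd).items PySem.Dict.empty hnd
    (fun kv _ => by simp [PySem.Dict.contains_empty])
  have hvals : ((PySem.Dict.ofList dd).items.foldl
      (fun fs kv => if pvC kv.2 then fs.insert kv.1 (pvL kv.2) else fs) PySem.Dict.empty).values
      = ((PySem.Dict.ofList dd).items.filter (fun kv => pvC kv.2)).map (fun kv => pvL kv.2) := by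
    simp only [PySem.Dict.values, hfold]
    simp [List.map_map, Function.comp_def, PySem.Dict.empty]
  rw [hvals, foldl_append_chunks, b_step,
      PySem.List.foldl_append_if pvC (fun v => (pvL v).toList ++ ['、'])]
  rw [join_nil_flatten]
  simp [PySem.Dict.values, List.filter_map, List.map_map, Function.comp_def, List.flatMap_def]
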